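-- pv_equiv track=rewrite | github.com/RPG-NJU/DA-PathFitting | TaskTwo.py | GetAllUsableXYandTime
-- ===== SOURCE A (Python) =====
-- def GetAllUsableXYandTime(coord: list) -> list:
--     X = list()
--     Y = list()
--     T = list()
--     for line in coord:
--         if line[3] == 1:
--             X.append(line[1])
--             Y.append(line[2])
--             T.append(line[0])
--
--     return [X, Y, T]
-- ===== SOURCE B (Python) =====
-- def GetAllUsableXYandTime(coord: list) -> list:
--     # Three staged passes, one per output column, driven by the column-index table (1, 2, 0):
--     # each pass independently scans coord and extracts its own column from flagged rows.
--     return [[row[j] for row in coord if row[3] == 1] for j in (1, 2, 0)]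
-- ===== Notes on version B (the rewrite author's own statement) =====
-- stated objective: alternative
-- what changed: B replaces A's single loop maintaining three interleaved append-accumulators by three independent staged passes over the input, one per output column, driven by a column-index table (1,2,0), with no accumulator state at all.
import Mathlib
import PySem

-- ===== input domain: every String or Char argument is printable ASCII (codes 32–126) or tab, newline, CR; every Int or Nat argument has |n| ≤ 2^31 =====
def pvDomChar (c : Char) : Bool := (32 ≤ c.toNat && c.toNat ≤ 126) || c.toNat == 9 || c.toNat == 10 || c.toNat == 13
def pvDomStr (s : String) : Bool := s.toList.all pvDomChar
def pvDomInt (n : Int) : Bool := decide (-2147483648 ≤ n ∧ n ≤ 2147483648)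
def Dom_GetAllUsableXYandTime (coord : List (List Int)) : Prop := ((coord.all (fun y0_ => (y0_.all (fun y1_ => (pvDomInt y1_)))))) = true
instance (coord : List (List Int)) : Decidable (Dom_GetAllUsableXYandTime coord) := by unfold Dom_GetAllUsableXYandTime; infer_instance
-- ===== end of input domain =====

-- B replaces A's single loop with three interleaved append-accumulators by three independent
-- staged passes over coord, one per output column, driven by a column-index table (1,2,0);
-- same value on Pre_ (alternative decomposition, not faster).

-- ===== PORT A =====
-- A's loop over coord with three accumulators X, Y, T; line[k] ported as (pyGet? k).getD 0,
-- exact on Pre_ (rows of length ≥ 4, where Python does not raise IndexError).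
def GetAllUsableXYandTime (coord : List (List Int)) : List (List Int) :=
  let s := coord.foldl
    (fun (acc : List Int × List Int × List Int) line =>
      if (PySem.List.pyGet? line 3).getD 0 == 1 then
        (acc.1 ++ [(PySem.List.pyGet? line 1).getD 0],
         acc.2.1 ++ [(PySem.List.pyGet? line 2).getD 0],
         acc.2.2 ++ [(PySem.List.pyGet? line 0).getD 0])
      else acc)
    ([], [], [])
  [s.1, s.2.1, s.2.2]

-- ===== PORT B =====
-- Source B's nested comprehension: outer pass over the index table (1,2,0); each inner
-- comprehension [row[j] for row in coord if row[3] == 1] is a filterMap over coord.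
def GetAllUsableXYandTime_alt (coord : List (List Int)) : List (List Int) :=
  ([1, 2, 0] : List Int).map (fun j =>
    coord.filterMap (fun row =>
      if (PySem.List.pyGet? row 3).getD 0 == 1 then some ((PySem.List.pyGet? row j).getD 0)
      else none))

-- ===== PRECONDITION & SPEC =====
-- Pre_ excludes exactly the inputs where Python A raises IndexError: any row shorter than 4 elements.
def Pre_GetAllUsableXYandTime (coord : List (List Int)) : Prop :=
  ∀ l ∈ coord, 4 ≤ l.length
instance (coord : List (List Int)) : Decidable (Pre_GetAllUsableXYandTime coord) := by
  unfold Pre_GetAllUsableXYandTime; infer_instance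
def pvWitness_GetAllUsableXYandTime : List (List Int) := [[0, 5, 6, 1], [7, 8, 9, 0]]

def Spec_GetAllUsableXYandTime (coord : List (List Int)) (out : List (List Int)) : Prop := out = GetAllUsableXYandTime_alt coord
instance (coord : List (List Int)) (out : List (List Int)) : Decidable (Spec_GetAllUsableXYandTime coord out) := by unfold Spec_GetAllUsableXYandTime; infer_instance

-- ===== CLAIM (what is proved, stated in full; the proofs are below) =====
def Claim_equal_GetAllUsableXYandTime : Prop := ∀ (coord : List (List Int)), Dom_GetAllUsableXYandTime coord → Pre_GetAllUsableXYandTime coord → Spec_GetAllUsableXYandTime coord (GetAllUsableXYandTime coord)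

-- ===== LEMMAS AND PROOFS =====

-- Loop invariant: A's fold with accumulator (a,b,c) appends, for each flagged row, the three columns.
theorem pvFold_eq (coord : List (List Int)) (a b c : List Int) :
    coord.foldl
      (fun (acc : List Int × List Int × List Int) line =>
        if (PySem.List.pyGet? line 3).getD 0 == 1 then
          (acc.1 ++ [(PySem.List.pyGet? line 1).getD 0],
           acc.2.1 ++ [(PySem.List.pyGet? line 2).getD 0],
           acc.2.2 ++ [(PySem.List.pyGet? line 0).getD 0])
        else acc)
      (a, b, c)
    = (a ++ coord.filterMap (fun r =>
          if (PySem.List.pyGet? r 3).getD 0 == 1 then some ((PySem.List.pyGet? r 1).getD 0) else none),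
       b ++ coord.filterMap (fun r =>
          if (PySem.List.pyGet? r 3).getD 0 == 1 then some ((PySem.List.pyGet? r 2).getD 0) else none),
       c ++ coord.filterMap (fun r =>
          if (PySem.List.pyGet? r 3).getD 0 == 1 then some ((PySem.List.pyGet? r 0).getD 0) else none)) := by
  induction coord generalizing a b c with
  | nil => simp
  | cons hd tl ih =>
    simp only [List.foldl_cons, List.filterMap_cons]
    by_cases h : ((PySem.List.pyGet? hd 3).getD 0 == 1) = true
    · rw [if_pos h, ih]; simp [h]
    · rw [if_neg h, ih]; simp [h]

-- ===== VERDICT (by name: the statement is the Claim_ definition above) =====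
theorem GetAllUsableXYandTime_spec : Claim_equal_GetAllUsableXYandTime := by
  intro coord _ _
  unfold Spec_GetAllUsableXYandTime GetAllUsableXYandTime GetAllUsableXYandTime_alt
  simp only [pvFold_eq, List.map, List.nil_append]
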